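-- pv_equiv track=rewrite | github.com/imaantaheri/AnoLT | Auto-RL/auto-rl.py | smooth_actions
-- ===== SOURCE A (Python) =====
-- WINDOW_SMOOTHING = 1
--
-- def smooth_actions(actions, l=WINDOW_SMOOTHING):
--     forward = []
--     n = len(actions)
--     for i in range(n):
--         start = max(0, i - l)
--         end = min(n, i + l + 1)
--         if sum(actions[start:end]) > l:
--             forward.append(1)
--         else:
--             forward.append(0)
--     backward = []
--     for i in reversed(range(n)):
--         start = max(0, i - l)
--         end = min(n, i + l + 1)
--         if sum(actions[start:end]) > l:
--             backward.append(1)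
--         else:
--             backward.append(0)
--     backward = list(reversed(backward))
--     return [f & b for f, b in zip(forward, backward)]
-- ===== SOURCE B (Python) =====
-- WINDOW_SMOOTHING = 1
--
-- def smooth_actions(actions, l=WINDOW_SMOOTHING):
--     # Single pass over one prefix-sum table: each window sum in O(1),
--     # and the backward pass of A (identical to the forward pass) is dropped.
--     n = len(actions)
--     pref = [0]
--     for a in actions:
--         pref.append(pref[-1] + a)
--     out = []
--     for i in range(n):
--         lo = min(max(0, i - l), n)
--         hi = max(min(n, i + l + 1), lo)
--         out.append(1 if pref[hi] - pref[lo] > l else 0)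
--     return out
-- ===== Notes on version B (the rewrite author's own statement) =====
-- stated objective: faster
-- what changed: B builds one prefix-sum table and answers every window sum in O(1) in a single pass, instead of A's per-index slice summation done twice (identical forward and backward passes) and recombined with '&'.
-- outside the precondition, e.g. on smooth_actions([-1, -1, 2, -4, 1, -1], -3): A returns [0, 1, 1, 1, 1, 1], B returns [1, 1, 1, 1, 1, 1]
import Mathlib
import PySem

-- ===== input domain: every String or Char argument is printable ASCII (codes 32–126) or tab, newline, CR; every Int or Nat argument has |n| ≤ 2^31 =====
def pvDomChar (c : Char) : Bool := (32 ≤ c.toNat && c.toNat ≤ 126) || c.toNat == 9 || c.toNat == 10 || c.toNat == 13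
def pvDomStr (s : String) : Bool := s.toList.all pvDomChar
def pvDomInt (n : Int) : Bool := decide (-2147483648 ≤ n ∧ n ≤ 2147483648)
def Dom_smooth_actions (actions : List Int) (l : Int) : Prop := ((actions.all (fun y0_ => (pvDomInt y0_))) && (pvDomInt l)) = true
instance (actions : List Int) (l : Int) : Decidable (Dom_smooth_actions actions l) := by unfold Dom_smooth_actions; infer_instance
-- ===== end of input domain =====

-- B replaces A's twice-repeated O(n·l) slice-summing passes by one prefix-sum pass (faster, asymptotic).


-- ===== PORT A =====
-- window value at index i: 1 if sum(actions[start:end]) > l else 0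
def pvWin (actions : List Int) (l : Int) (n : Int) (i : Int) : Int :=
  let start := max 0 (i - l)
  let stop := min n (i + l + 1)
  if (PySem.List.slice actions (some start) (some stop)).sum > l then 1 else 0

def smooth_actions (actions : List Int) (l : Int) : List Int :=
  let n : Int := actions.length
  let forward := (PySem.List.pyRange 0 n 1).map (fun i => pvWin actions l n i)
  let backward := ((PySem.List.pyRange 0 n 1).reverse.map (fun i => pvWin actions l n i)).reverse
  (forward.zip backward).map (fun p => Int.land p.1 p.2)

-- ===== PORT B =====
-- the prefix-sum list `pref` of Source B, built left to right carrying the running sum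
def pvPref (s : Int) : List Int → List Int
  | [] => [s]
  | a :: rest => s :: pvPref (s + a) rest

-- `pref[hi]`/`pref[lo]`: indices are provably nonnegative and in range in Source B, so `.getD ….toNat 0` is exact
def smooth_actions_alt (actions : List Int) (l : Int) : List Int :=
  let n : Int := actions.length
  let pref := pvPref 0 actions
  (PySem.List.pyRange 0 n 1).map (fun i =>
    let lo := min (max 0 (i - l)) n
    let hi := max (min n (i + l + 1)) lo
    if pref.getD hi.toNat 0 - pref.getD lo.toNat 0 > l then 1 else 0)

-- ===== PRECONDITION & SPEC =====
-- Pre_ excludes negative window lengths l (outside the smoother's natural domain), where A's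
-- window end min(n, i+l+1) can go negative and trigger Python's accidental negative-slice wraparound.
def Pre_smooth_actions (actions : List Int) (l : Int) : Prop := 0 ≤ l
instance (actions : List Int) (l : Int) : Decidable (Pre_smooth_actions actions l) := by unfold Pre_smooth_actions; infer_instance
def pvWitness_smooth_actions : List Int × Int := ([1, 0, 1, 1, 0], 1)

def Spec_smooth_actions (actions : List Int) (l : Int) (out : List Int) : Prop := out = smooth_actions_alt actions l
instance (actions : List Int) (l : Int) (out : List Int) : Decidable (Spec_smooth_actions actions l out) := by unfold Spec_smooth_actions; infer_instance

-- ===== CLAIM (what is proved, stated in full; the proofs are below) =====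
def Claim_equal_smooth_actions : Prop := ∀ (actions : List Int) (l : Int), Dom_smooth_actions actions l → Pre_smooth_actions actions l → Spec_smooth_actions actions l (smooth_actions actions l)

-- ===== LEMMAS AND PROOFS =====

theorem zip_self_map {α β : Type} (g : α → α → β) (xs : List α) :
    (xs.zip xs).map (fun p => g p.1 p.2) = xs.map (fun x => g x x) := by
  induction xs with
  | nil => rfl
  | cons a t ih => simp [List.zip]

theorem land_self (x : Int) : Int.land x x = x := by
  unfold Int.land
  cases x <;> simp

theorem pvPref_getD (xs : List Int) (s : Int) (k : Nat) (hk : k ≤ xs.length) :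
    (pvPref s xs).getD k 0 = s + (xs.take k).sum := by
  induction xs generalizing s k with
  | nil =>
    have hk0 : k = 0 := Nat.le_zero.mp (by simpa using hk)
    subst hk0; simp [pvPref]
  | cons a t ih =>
    cases k with
    | zero => simp [pvPref]
    | succ m =>
      simp only [pvPref, List.getD_cons_succ, List.take_succ_cons, List.sum_cons]
      rw [ih (s + a) m (by simpa using hk)]
      ring

theorem sum_drop_take (xs : List Int) (a b : Nat) (hab : a ≤ b) :
    (((xs.drop a).take (b - a)).sum : Int) = (xs.take b).sum - (xs.take a).sum := by
  have h : xs.take b = xs.take a ++ (xs.drop a).take (b - a) := by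
    conv_lhs => rw [show b = a + (b - a) by omega]
    rw [List.take_add]
  rw [h, List.sum_append]; ring

theorem win_eq (actions : List Int) (l i : Int) (hl : 0 ≤ l) (hi : 0 ≤ i)
    (hin : i < (actions.length : Int)) :
    pvWin actions l (actions.length : Int) i =
      (if (pvPref 0 actions).getD (max (min (actions.length : Int) (i + l + 1)) (min (max 0 (i - l)) (actions.length : Int))).toNat 0
          - (pvPref 0 actions).getD (min (max 0 (i - l)) (actions.length : Int)).toNat 0 > l then 1 else 0) := by
  set n : Int := (actions.length : Int) with hn
  have hlo : min (max 0 (i - l)) n = max 0 (i - l) := by omega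
  have hhi : max (min n (i + l + 1)) (max 0 (i - l)) = min n (i + l + 1) := by omega
  rw [hlo, hhi]
  set a : Int := max 0 (i - l) with ha
  set b : Int := min n (i + l + 1) with hb
  have ha0 : 0 ≤ a := by omega
  have hb0 : 0 ≤ b := by omega
  have hab : a ≤ b := by omega
  have hbn : b.toNat ≤ actions.length := by omega
  have han : a.toNat ≤ actions.length := by omega
  have habn : a.toNat ≤ b.toNat := by omega
  unfold pvWin
  simp only [← ha, ← hb]
  rw [PySem.List.slice_toNat actions ha0 hb0]
  rw [pvPref_getD actions 0 b.toNat hbn, pvPref_getD actions 0 a.toNat han]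
  rw [sum_drop_take actions a.toNat b.toNat habn]
  simp

theorem main_eq (actions : List Int) (l : Int) (hl : 0 ≤ l) :
    smooth_actions actions l = smooth_actions_alt actions l := by
  unfold smooth_actions smooth_actions_alt
  simp only [List.map_reverse, List.reverse_reverse]
  rw [zip_self_map, List.map_map]
  refine List.map_congr_left ?_
  intro i hi
  rw [PySem.List.mem_pyRange_one] at hi
  simp only [Function.comp_apply, land_self]
  exact win_eq actions l i hl hi.1 hi.2

-- ===== VERDICT (by name: the statement is the Claim_ definition above) =====
theorem smooth_actions_spec : Claim_equal_smooth_actions := by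
  intro actions l _ hpre
  exact main_eq actions l hpre
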